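-- pv_equiv track=rewrite | github.com/sschuler01/Lab-10 | L 101-104.py | new_d
-- ===== SOURCE A (Python) =====
-- def my_histogram(my_dict):
--     d = dict()
--     for key in my_dict:
--         if my_dict[key] not in d:
--             d[my_dict[key]] = 1
--         else:
--             d[my_dict[key]] += 1
--     return d
--
-- def new_d(d):
--     histogram = my_histogram(d)
--     empty_d = {}
--     for name in histogram:
--         val = histogram[name]
--         if val not in empty_d:
--             empty_d[val] = [name]
--         else:
--             empty_d[val].append(name)
--     return empty_d
-- ===== SOURCE B (Python) =====
-- def new_d(d):
--     vals = list(d.values())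
--     pairs = [(v, vals.count(v)) for v in dict.fromkeys(vals)]
--     return {c: [v for v, k in pairs if k == c]
--             for c in dict.fromkeys(k for _, k in pairs)}
-- ===== Notes on version B (the rewrite author's own statement) =====
-- stated objective: alternative
-- what changed: B abandons A's element-by-element mutation of two dicts: it lists each distinct value with its frequency (computed by scanning vals.count), then builds the result key-major in one dict comprehension, producing each count-bucket whole with a filter over that pair list.
import Mathlib
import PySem

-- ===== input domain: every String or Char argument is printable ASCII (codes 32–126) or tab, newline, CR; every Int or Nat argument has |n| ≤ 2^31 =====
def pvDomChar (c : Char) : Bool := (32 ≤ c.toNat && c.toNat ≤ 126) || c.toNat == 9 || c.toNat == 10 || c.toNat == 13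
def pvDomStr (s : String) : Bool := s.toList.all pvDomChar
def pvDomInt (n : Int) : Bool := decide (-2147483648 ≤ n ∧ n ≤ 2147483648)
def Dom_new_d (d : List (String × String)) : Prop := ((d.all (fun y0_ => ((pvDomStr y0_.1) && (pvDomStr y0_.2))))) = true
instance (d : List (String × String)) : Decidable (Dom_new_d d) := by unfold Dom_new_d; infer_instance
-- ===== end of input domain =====

-- B replaces A's two element-by-element dict-mutation passes by a key-major construction: distinct values paired with scan-counted frequencies, each count bucket built whole by a filter; equivalence of return values is proved.
-- ===== PORT A =====
def new_d (d : List (String × String)) : List (Int × List String) :=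
  let md := PySem.Dict.ofList d
  let histogram : PySem.Dict String Int :=
    md.items.foldl (fun h kv =>
      if h.contains kv.2 then h.modify kv.2 0 (· + 1) else h.insert kv.2 1)
      PySem.Dict.empty
  let empty_d : PySem.Dict Int (List String) :=
    histogram.items.foldl (fun e nv =>
      if e.contains nv.2 then e.modify nv.2 [] (· ++ [nv.1]) else e.insert nv.2 [nv.1])
      PySem.Dict.empty
  empty_d.items

-- ===== PORT B =====
def new_d_alt (d : List (String × String)) : List (Int × List String) :=
  let vals := (PySem.Dict.ofList d).values
  let pairs := (PySem.List.dedup vals).map (fun v => (v, (PySem.List.count vals v : Int)))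
  (PySem.List.dedup (pairs.map Prod.snd)).map (fun c =>
    (c, (pairs.filter (fun p => p.2 == c)).map Prod.fst))

-- ===== PRECONDITION & SPEC =====
def Spec_new_d (d : List (String × String)) (out : List (Int × List String)) : Prop := out = new_d_alt d
instance (d : List (String × String)) (out : List (Int × List String)) : Decidable (Spec_new_d d out) := by unfold Spec_new_d; infer_instance

-- ===== CLAIM (what is proved, stated in full; the proofs are below) =====
def Claim_equal_new_d : Prop := ∀ (d : List (String × String)), Dom_new_d d → Spec_new_d d (new_d d)

-- ===== LEMMAS AND PROOFS =====
lemma hist_step (h : PySem.Dict String Int) (x : String) :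
    (if h.contains x then h.modify x 0 (· + 1) else h.insert x 1) = h.modify x 0 (· + 1) := by
  by_cases hc : h.contains x = true <;>
    simp [hc, PySem.Dict.modify, PySem.Dict.insert, PySem.Dict.getD_of_not_contains]

lemma group_step (e : PySem.Dict Int (List String)) (c : Int) (n : String) :
    (if e.contains c then e.modify c [] (· ++ [n]) else e.insert c [n]) = e.modify c [] (· ++ [n]) := by
  by_cases hc : e.contains c = true <;>
    simp [hc, PySem.Dict.modify, PySem.Dict.insert, PySem.Dict.getD_of_not_contains]

-- the grouping fold over any pair list L, read out key-major: items = distinct counts mapped to their filtered buckets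
lemma items_group_fold (L : List (String × Int)) :
    (L.foldl (fun e nv => e.modify nv.2 [] (· ++ [nv.1])) PySem.Dict.empty).items
      = (PySem.List.dedup (L.map Prod.snd)).map (fun c =>
          (c, (L.filter (fun p => p.2 == c)).map Prod.fst)) := by
  have hfold : (L.foldl (fun e nv => e.modify nv.2 [] (· ++ [nv.1])) PySem.Dict.empty)
      = ((L.map Prod.swap).foldl (fun e p => e.modify p.1 [] (· ++ [p.2])) PySem.Dict.empty) := by
    rw [List.foldl_map]; rfl
  rw [hfold]
  have hnd : ((L.map Prod.swap).foldl (fun e p => e.modify p.1 [] (· ++ [p.2]))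
      (PySem.Dict.empty : PySem.Dict Int (List String))).keys.Nodup := by
    exact PySem.Dict.nodup_keys_foldl_modify_key _ _ _ _ _ PySem.Dict.nodup_keys_empty
  rw [PySem.Dict.items_eq_map_keys _ hnd []]
  rw [PySem.Dict.keys_foldl_modify_key]
  simp only [PySem.Dict.keys_empty, PySem.Dict.getD_foldl_modify_append, PySem.Dict.getD_empty,
    List.nil_append]
  have hkeys : PySem.Set.update ([] : List Int) ((L.map Prod.swap).map (·.1))
      = PySem.List.dedup (L.map Prod.snd) := by
    simp [PySem.List.dedup_eq_ofList, PySem.Set.ofList, PySem.Set.update, List.map_map]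
    rfl
  rw [hkeys]
  apply List.map_congr_left
  intro c _
  congr 1
  rw [List.filter_map, List.map_map]
  rfl

-- ===== VERDICT (by name: the statement is the Claim_ definition above) =====
theorem new_d_spec : Claim_equal_new_d := by
  intro d _
  show new_d d = new_d_alt d
  unfold new_d new_d_alt
  simp only [hist_step, group_step, PySem.Dict.values]
  rw [show ((PySem.Dict.ofList d).items.foldl
        (fun h kv => h.modify kv.2 0 (· + 1)) PySem.Dict.empty)
      = PySem.Dict.counter ((PySem.Dict.ofList d).items.map Prod.snd) by
    rw [PySem.Dict.counter_eq_foldl, List.foldl_map]]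
  rw [PySem.Dict.items_counter, items_group_fold]
  simp [PySem.List.dedup_eq_ofList, PySem.List.count_eq, List.map_map]
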